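-- pv_equiv track=rewrite | github.com/weiyu0824/fetch-result-test | spend_points.py | cal_result
-- ===== SOURCE A (Python) =====
-- from typing import List, Tuple
-- from collections import defaultdict
--
-- def cal_result(records: List[Tuple], spend: int):
--     """
--     Calculate the result after spending the points
--     Args:
--         records: list of record
--         spend: amount of points
--     """
--
--     balance = defaultdict(lambda: 0)
--     for record in records:
--         payer = record[0]
--         points = record[1]
--         balance[payer] += points
--
--     remain = spend
--     for record in records:
--         payer, points = record[0], record[1]
--         if remain >= points:
--             balance[payer] -= points
--             remain -= points
--         else:
--             balance[payer] -= remain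
--             remain = 0
--             break
--     return remain, dict(balance)
-- ===== SOURCE B (Python) =====
-- from typing import List, Tuple
--
-- def cal_result(records: List[Tuple], spend: int):
--     """Phase 1: totals per payer. Phase 2: find the break index k as the first
--     record whose inclusion pushes the prefix sum of points above spend (the
--     loop in the reference continues exactly while spend >= prefix sum).
--     Phase 3: subtract the fully-spent prefix from the totals and, if the scan
--     broke, charge the partial amount to the breaking payer."""
--     totals = {}
--     for payer, points in records:
--         totals[payer] = totals.get(payer, 0) + points
--
--     s = 0
--     k = len(records)
--     for i, (_, points) in enumerate(records):
--         if spend < s + points: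
--             k = i
--             break
--         s += points
--
--     balance = dict(totals)
--     for payer, points in records[:k]:
--         balance[payer] -= points
--     if k < len(records):
--         balance[records[k][0]] -= spend - s
--         return 0, balance
--     return spend - s, balance
-- ===== Notes on version B (the rewrite author's own statement) =====
-- stated objective: alternative
-- what changed: Replaces A's stateful spend loop (mutating remain with an in-loop break) by an arithmetic characterization: B first finds the break index as the first record whose prefix sum of points exceeds spend, then subtracts the fully-spent prefix from precomputed totals and charges the partial remainder to the breaking payer in a final step.
import Mathlib
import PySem

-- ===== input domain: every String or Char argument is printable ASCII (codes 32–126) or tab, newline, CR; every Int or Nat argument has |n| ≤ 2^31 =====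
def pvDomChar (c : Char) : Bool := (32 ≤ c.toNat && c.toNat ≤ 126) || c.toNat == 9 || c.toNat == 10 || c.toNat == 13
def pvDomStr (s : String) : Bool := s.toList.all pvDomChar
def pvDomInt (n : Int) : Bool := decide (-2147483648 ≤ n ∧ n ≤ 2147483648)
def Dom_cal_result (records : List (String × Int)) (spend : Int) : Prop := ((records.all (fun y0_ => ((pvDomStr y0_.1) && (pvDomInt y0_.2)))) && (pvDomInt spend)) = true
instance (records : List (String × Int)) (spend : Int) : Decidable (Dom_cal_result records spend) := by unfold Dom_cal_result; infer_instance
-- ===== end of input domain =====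

-- B replaces A's stateful spend loop by a prefix-sum break-index scan plus
-- staged deduction (alternative decomposition, same cost).

-- ===== PORT A =====
-- second loop of A: deduct from balances until the break (remain < points)
def calLoopA : List (String × Int) → PySem.Dict String Int → Int → Int × PySem.Dict String Int
  | [], bal, remain => (remain, bal)
  | (payer, points) :: rest, bal, remain =>
    if remain ≥ points then
      calLoopA rest (bal.modify payer 0 (fun v => v - points)) (remain - points)
    else
      (0, bal.modify payer 0 (fun v => v - remain))

def cal_result (records : List (String × Int)) (spend : Int) : Int × (List (String × Int)) :=
  let balance := records.foldl (fun b r => b.modify r.1 0 (fun v => v + r.2)) PySem.Dict.empty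
  let res := calLoopA records balance spend
  (res.1, res.2.items)

-- ===== PORT B =====
-- phase-2 scan of B: first index k whose record pushes the prefix sum above spend
-- (returns (k, prefix sum before index k)); i is the running index
def calFindBreak : List (String × Int) → Int → Int → Nat → Nat × Int
  | [], _, s, i => (i, s)
  | (_, points) :: rest, spend, s, i =>
    if spend < s + points then (i, s)
    else calFindBreak rest spend (s + points) (i + 1)

-- phase-3 loop of B: subtract each record's points from the balance
def calDeduct (bal : PySem.Dict String Int) (l : List (String × Int)) : PySem.Dict String Int :=
  l.foldl (fun b r => b.modify r.1 0 (fun v => v - r.2)) bal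

def cal_result_alt (records : List (String × Int)) (spend : Int) : Int × (List (String × Int)) :=
  let totals := records.foldl (fun b r => b.modify r.1 0 (fun v => v + r.2)) PySem.Dict.empty
  let ks := calFindBreak records spend 0 0
  let balance := calDeduct totals (records.take ks.1)
  if h : ks.1 < records.length then
    (0, (balance.modify (records.get ⟨ks.1, h⟩).1 0 (fun v => v - (spend - ks.2))).items)
  else
    (spend - ks.2, balance.items)

-- ===== PRECONDITION & SPEC =====
def Spec_cal_result (records : List (String × Int)) (spend : Int) (out : Int × (List (String × Int))) : Prop := out = cal_result_alt records spend
instance (records : List (String × Int)) (spend : Int) (out : Int × (List (String × Int))) : Decidable (Spec_cal_result records spend out) := by unfold Spec_cal_result; infer_instance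

-- ===== CLAIM (what is proved, stated in full; the proofs are below) =====
def Claim_equal_cal_result : Prop := ∀ (records : List (String × Int)) (spend : Int), Dom_cal_result records spend → Spec_cal_result records spend (cal_result records spend)

-- ===== LEMMAS AND PROOFS =====

-- B's phases 2+3 combined, as a function of the starting dict and remaining spend
def combineB (l : List (String × Int)) (bal : PySem.Dict String Int) (remain : Int) :
    Int × PySem.Dict String Int :=
  let ks := calFindBreak l remain 0 0
  if h : ks.1 < l.length then
    (0, (calDeduct bal (l.take ks.1)).modify (l.get ⟨ks.1, h⟩).1 0 (fun v => v - (remain - ks.2)))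
  else
    (remain - ks.2, calDeduct bal (l.take ks.1))

-- shifting the accumulators of the break scan
theorem calFindBreak_shift (l : List (String × Int)) (spend s : Int) (i : Nat) :
    calFindBreak l spend s i
      = ((calFindBreak l (spend - s) 0 0).1 + i, (calFindBreak l (spend - s) 0 0).2 + s) := by
  induction l generalizing spend s i with
  | nil => simp [calFindBreak]
  | cons x rest ih =>
    obtain ⟨p, pts⟩ := x
    simp only [calFindBreak]
    by_cases hc : spend < s + pts
    · rw [if_pos hc, if_pos (by omega), Int.zero_add]; simp
    · rw [if_neg hc, if_neg (by omega : ¬ spend - s < 0 + pts), Int.zero_add,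
        ih spend (s + pts) (i + 1), ih (spend - s) pts 1]
      have : spend - (s + pts) = spend - s - pts := by ring
      rw [this]
      simp only [Prod.mk.injEq]
      exact ⟨by omega, by ring⟩

theorem calLoopA_eq_combineB (l : List (String × Int)) (bal : PySem.Dict String Int)
    (remain : Int) : calLoopA l bal remain = combineB l bal remain := by
  induction l generalizing bal remain with
  | nil => simp [calLoopA, combineB, calFindBreak, calDeduct]
  | cons x rest ih =>
    obtain ⟨p, pts⟩ := x
    by_cases hge : remain ≥ pts
    · have hlt : ¬ remain < pts := by omega
      simp only [calLoopA, if_pos hge, ih, combineB, calFindBreak, Int.zero_add, if_neg hlt,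
        calFindBreak_shift rest remain pts 1]
      by_cases h : (calFindBreak rest (remain - pts) 0 0).1 < rest.length
      · rw [dif_pos (show (calFindBreak rest (remain - pts) 0 0).1 + 1 <
            ((p, pts) :: rest).length by simp; omega), dif_pos h]
        simp only [List.take_succ_cons, List.get_eq_getElem, List.getElem_cons_succ,
          calDeduct, List.foldl_cons, Prod.mk.injEq, true_and]
        congr 2
        funext v
        ring
      · rw [dif_neg (show ¬ (calFindBreak rest (remain - pts) 0 0).1 + 1 <
            ((p, pts) :: rest).length by simp; omega), dif_neg h]
        simp only [List.take_succ_cons, calDeduct, List.foldl_cons, Prod.mk.injEq]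
        exact ⟨by ring, trivial⟩
    · have hlt : remain < pts := by omega
      simp only [calLoopA, if_neg hge, combineB, calFindBreak, Int.zero_add]
      simp only [if_pos hlt]
      rw [dif_pos (by simp)]
      simp [calDeduct]

-- ===== VERDICT (by name: the statement is the Claim_ definition above) =====
theorem cal_result_spec : Claim_equal_cal_result := by
  intro records spend _
  show cal_result records spend = cal_result_alt records spend
  simp only [cal_result, cal_result_alt, calLoopA_eq_combineB, combineB]
  split
  · rfl
  · rfl
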